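-- pv_equiv track=rewrite | github.com/BAMDH/Cosas_Uni | Taller programación/Proyecto/Imagen/Quick_Sort_Matriz.py | conseguir_ventana
-- ===== SOURCE A (Python) =====
-- def conse_elemento(lista,columna,ventana,contador):
--     """
--     Se define una función que consigue los elementos de la ventana
--     se crea una variable nueva_posicion que contenga los elementos de la nueva
--     posición
--     """
--     if contador== ventana:
--         return []
--     else:
--         nueva_posicion=columna-ventana+contador+1
--         if nueva_posicion<0 or nueva_posicion>=len(lista):
--             return conse_elemento(lista,columna, ventana, contador+1)
--         else:
--             nuevo_elemento=lista[nueva_posicion]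
--             return [nuevo_elemento]+conse_elemento(lista,columna, ventana, contador+1)
--
-- def conseguir_ventana(lista,columna,fila,ventana,nueva_lista,contador):
--     """
--     Se crea una función que consigue la ventana
--     se crea una variable nueva_fila que contenga el valor de la fila actual
--     menos la ventana mas el contador incrementado en 1
--     """
--     if contador == ventana:
--         return nueva_lista
--     else:
--         nueva_fila = fila - ventana + contador + 1
--         if (nueva_fila <0 or nueva_fila >= len(lista)):
--            return conseguir_ventana(lista,columna,fila,ventana,nueva_lista,contador+1)
--         else:
--             resultado = conse_elemento(lista[nueva_fila], columna, ventana, 0)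
--             return conseguir_ventana(lista, columna, fila, ventana, nueva_lista + resultado, contador + 1)
-- ===== SOURCE B (Python) =====
-- def conseguir_ventana(lista, columna, fila, ventana, nueva_lista, contador):
--     recogidos = []
--     for c in range(contador, ventana):
--         nueva_fila = fila - ventana + c + 1
--         if 0 <= nueva_fila < len(lista):
--             fila_actual = lista[nueva_fila]
--             for d in range(0, ventana):
--                 nueva_posicion = columna - ventana + d + 1
--                 if 0 <= nueva_posicion < len(fila_actual):
--                     recogidos.append(fila_actual[nueva_posicion])
--     return nueva_lista + recogidos
-- ===== Notes on version B (the rewrite author's own statement) =====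
-- stated objective: idiomatic
-- what changed: Replaces the two mutually layered recursive functions (list-concatenating recursion with a helper conse_elemento) by a single function with two nested iterative for-loops appending into one accumulator list, concatenated to nueva_lista at the end.
import Mathlib
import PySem

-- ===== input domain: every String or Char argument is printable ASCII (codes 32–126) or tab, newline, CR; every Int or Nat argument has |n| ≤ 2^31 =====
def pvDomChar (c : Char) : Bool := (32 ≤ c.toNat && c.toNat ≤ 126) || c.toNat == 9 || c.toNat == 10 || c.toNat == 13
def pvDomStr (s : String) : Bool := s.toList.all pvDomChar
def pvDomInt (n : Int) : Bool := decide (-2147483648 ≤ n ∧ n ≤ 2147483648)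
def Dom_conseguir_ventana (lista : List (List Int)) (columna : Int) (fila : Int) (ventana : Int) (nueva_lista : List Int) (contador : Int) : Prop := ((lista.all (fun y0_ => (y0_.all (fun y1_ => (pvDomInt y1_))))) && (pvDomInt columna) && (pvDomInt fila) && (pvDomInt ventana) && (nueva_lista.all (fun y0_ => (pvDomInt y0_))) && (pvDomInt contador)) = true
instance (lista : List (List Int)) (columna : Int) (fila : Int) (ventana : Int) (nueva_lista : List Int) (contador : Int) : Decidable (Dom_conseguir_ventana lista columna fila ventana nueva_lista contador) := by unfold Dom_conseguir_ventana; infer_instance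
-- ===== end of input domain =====

-- B rewrites A's two mutually layered recursive collectors as one function with two nested
-- iterative loops over ranges (objective: idiomatic); return values agree on all of Pre_.


-- ===== PORT A =====
-- A's recursions are transliterated with a fuel parameter that, inside Pre_, counts
-- exactly the recursive calls the Python makes; on the inputs Pre_ excludes the Python
-- recursion never reaches its base case (RecursionError), so nothing is claimed there.
def conse_elemento_go (fuel : Nat) (lista : List Int) (columna : Int) (ventana : Int) (contador : Int) : List Int :=
  match fuel with
  | 0 => []
  | fuel + 1 =>
    if contador = ventana then []
    else
      let nueva_posicion := columna - ventana + contador + 1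
      if nueva_posicion < 0 ∨ nueva_posicion ≥ (lista.length : Int) then
        conse_elemento_go fuel lista columna ventana (contador + 1)
      else
        PySem.List.pyGetD lista nueva_posicion 0 ::
          conse_elemento_go fuel lista columna ventana (contador + 1)

def conse_elemento (lista : List Int) (columna : Int) (ventana : Int) (contador : Int) : List Int :=
  conse_elemento_go ((ventana - contador).toNat + 1) lista columna ventana contador

def conseguir_ventana_go (fuel : Nat) (lista : List (List Int)) (columna : Int) (fila : Int) (ventana : Int) (nueva_lista : List Int) (contador : Int) : List Int :=
  match fuel with
  | 0 => nueva_lista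
  | fuel + 1 =>
    if contador = ventana then nueva_lista
    else
      let nueva_fila := fila - ventana + contador + 1
      if nueva_fila < 0 ∨ nueva_fila ≥ (lista.length : Int) then
        conseguir_ventana_go fuel lista columna fila ventana nueva_lista (contador + 1)
      else
        let resultado := conse_elemento (PySem.List.pyGetD lista nueva_fila []) columna ventana 0
        conseguir_ventana_go fuel lista columna fila ventana (nueva_lista ++ resultado) (contador + 1)

def conseguir_ventana (lista : List (List Int)) (columna : Int) (fila : Int) (ventana : Int) (nueva_lista : List Int) (contador : Int) : List Int :=
  conseguir_ventana_go ((ventana - contador).toNat + 1) lista columna fila ventana nueva_lista contador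

-- ===== PORT B =====
def conseguir_ventana_alt (lista : List (List Int)) (columna : Int) (fila : Int) (ventana : Int) (nueva_lista : List Int) (contador : Int) : List Int :=
  let recogidos :=
    (PySem.List.pyRange contador ventana 1).foldl (fun recogidos c =>
      let nueva_fila := fila - ventana + c + 1
      if 0 ≤ nueva_fila ∧ nueva_fila < (lista.length : Int) then
        let fila_actual := PySem.List.pyGetD lista nueva_fila []
        (PySem.List.pyRange 0 ventana 1).foldl (fun recogidos d =>
          let nueva_posicion := columna - ventana + d + 1
          if 0 ≤ nueva_posicion ∧ nueva_posicion < (fila_actual.length : Int) then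
            recogidos ++ [PySem.List.pyGetD fila_actual nueva_posicion 0]
          else recogidos) recogidos
      else recogidos) []
  nueva_lista ++ recogidos

-- ===== PRECONDITION & SPEC =====
-- Pre_ excludes exactly the inputs on which A's recursion never reaches a base case and
-- CPython raises RecursionError: contador > ventana (the outer base case is skipped), and
-- ventana < 0 with contador < ventana when some generated row index lies inside lista (the
-- inner recursion, started at 0, can then never reach its base case contador == ventana).
def Pre_conseguir_ventana (lista : List (List Int)) (columna : Int) (fila : Int) (ventana : Int) (nueva_lista : List Int) (contador : Int) : Prop :=
  contador = ventana ∨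
    (contador < ventana ∧
      (0 ≤ ventana ∨
        ∀ c ∈ PySem.List.pyRange contador ventana 1,
          ¬ (0 ≤ fila - ventana + c + 1 ∧ fila - ventana + c + 1 < (lista.length : Int))))
instance (lista : List (List Int)) (columna : Int) (fila : Int) (ventana : Int) (nueva_lista : List Int) (contador : Int) : Decidable (Pre_conseguir_ventana lista columna fila ventana nueva_lista contador) := by unfold Pre_conseguir_ventana; infer_instance

def pvWitness_conseguir_ventana : List (List Int) × Int × Int × Int × List Int × Int :=
  ([[1, 2, 3], [4, 5, 6], [7, 8, 9]], 1, 1, 2, [0], 0)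

def Spec_conseguir_ventana (lista : List (List Int)) (columna : Int) (fila : Int) (ventana : Int) (nueva_lista : List Int) (contador : Int) (out : List Int) : Prop := out = conseguir_ventana_alt lista columna fila ventana nueva_lista contador
instance (lista : List (List Int)) (columna : Int) (fila : Int) (ventana : Int) (nueva_lista : List Int) (contador : Int) (out : List Int) : Decidable (Spec_conseguir_ventana lista columna fila ventana nueva_lista contador out) := by unfold Spec_conseguir_ventana; infer_instance

-- ===== CLAIM (what is proved, stated in full; the proofs are below) =====
def Claim_equal_conseguir_ventana : Prop := ∀ (lista : List (List Int)) (columna : Int) (fila : Int) (ventana : Int) (nueva_lista : List Int) (contador : Int), Dom_conseguir_ventana lista columna fila ventana nueva_lista contador → Pre_conseguir_ventana lista columna fila ventana nueva_lista contador → Spec_conseguir_ventana lista columna fila ventana nueva_lista contador (conseguir_ventana lista columna fila ventana nueva_lista contador)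

-- ===== LEMMAS AND PROOFS =====

-- one-step unfoldings of the fuelled recursions (definitional)
lemma conse_go_succ (fuel : Nat) (row : List Int) (columna ventana c : Int) :
    conse_elemento_go (fuel + 1) row columna ventana c =
      if c = ventana then []
      else
        if columna - ventana + c + 1 < 0 ∨ columna - ventana + c + 1 ≥ (row.length : Int) then
          conse_elemento_go fuel row columna ventana (c + 1)
        else
          PySem.List.pyGetD row (columna - ventana + c + 1) 0 ::
            conse_elemento_go fuel row columna ventana (c + 1) := rfl

lemma conseguir_go_succ (fuel : Nat) (lista : List (List Int)) (columna fila ventana : Int) (nl : List Int) (c : Int) :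
    conseguir_ventana_go (fuel + 1) lista columna fila ventana nl c =
      if c = ventana then nl
      else
        if fila - ventana + c + 1 < 0 ∨ fila - ventana + c + 1 ≥ (lista.length : Int) then
          conseguir_ventana_go fuel lista columna fila ventana nl (c + 1)
        else
          conseguir_ventana_go fuel lista columna fila ventana
            (nl ++ conse_elemento (PySem.List.pyGetD lista (fila - ventana + c + 1) []) columna ventana 0) (c + 1) := rfl

-- A's inner recursion, with exact fuel, is the filtered-and-mapped range B's inner loop collects.
lemma conse_go_eq (row : List Int) (columna ventana : Int) :
    ∀ (n : Nat) (c : Int), c + (n : Int) = ventana →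
      conse_elemento_go (n + 1) row columna ventana c =
        ((PySem.List.pyRange c ventana 1).filter
            (fun d => decide (0 ≤ columna - ventana + d + 1 ∧ columna - ventana + d + 1 < (row.length : Int)))).map
          (fun d => PySem.List.pyGetD row (columna - ventana + d + 1) 0) := by
  intro n
  induction n with
  | zero =>
      intro c hc
      have hcv : c = ventana := by omega
      subst hcv
      simp [conse_elemento_go, PySem.List.pyRange_one]
  | succ n ih =>
      intro c hc
      have hlt : c < ventana := by omega
      rw [PySem.List.pyRange_one_cons hlt]
      have hne : ¬ c = ventana := by omega
      have hrec := ih (c + 1) (by push_cast at hc ⊢; omega)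
      rw [conse_go_succ, if_neg hne, List.filter_cons]
      by_cases h : columna - ventana + c + 1 < 0 ∨ columna - ventana + c + 1 ≥ (row.length : Int)
      · have hd : decide (0 ≤ columna - ventana + c + 1 ∧ columna - ventana + c + 1 < (row.length : Int)) = false := by
          simp only [decide_eq_false_iff_not]; omega
        rw [if_pos h, hd, hrec]; simp
      · have hd : decide (0 ≤ columna - ventana + c + 1 ∧ columna - ventana + c + 1 < (row.length : Int)) = true := by
          simp only [decide_eq_true_eq]; omega
        rw [if_neg h, hd, hrec]; simp

-- A's outer recursion, with exact fuel, appends to nueva_lista the concatenation of the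
-- per-row results over the remaining range.
lemma conseguir_go_eq (lista : List (List Int)) (columna fila ventana : Int) :
    ∀ (n : Nat) (nl : List Int) (c : Int), c + (n : Int) = ventana →
      conseguir_ventana_go (n + 1) lista columna fila ventana nl c =
        nl ++ (PySem.List.pyRange c ventana 1).flatMap (fun cc =>
          if 0 ≤ fila - ventana + cc + 1 ∧ fila - ventana + cc + 1 < (lista.length : Int) then
            conse_elemento (PySem.List.pyGetD lista (fila - ventana + cc + 1) []) columna ventana 0
          else []) := by
  intro n
  induction n with
  | zero =>
      intro nl c hc
      have hcv : c = ventana := by omega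
      subst hcv
      simp [conseguir_ventana_go, PySem.List.pyRange_one]
  | succ n ih =>
      intro nl c hc
      have hlt : c < ventana := by omega
      rw [PySem.List.pyRange_one_cons hlt]
      have hne : ¬ c = ventana := by omega
      rw [conseguir_go_succ, if_neg hne, List.flatMap_cons]
      by_cases h : fila - ventana + c + 1 < 0 ∨ fila - ventana + c + 1 ≥ (lista.length : Int)
      · have hd : ¬ (0 ≤ fila - ventana + c + 1 ∧ fila - ventana + c + 1 < (lista.length : Int)) := by omega
        rw [if_pos h, ih nl (c + 1) (by push_cast at hc ⊢; omega), if_neg hd]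
        simp
      · have hd : (0 ≤ fila - ventana + c + 1 ∧ fila - ventana + c + 1 < (lista.length : Int)) := by omega
        rw [if_neg h, ih _ (c + 1) (by push_cast at hc ⊢; omega), if_pos hd]
        simp [List.append_assoc]

-- B's guarded extend-loop is a flatMap over the range.
lemma foldl_extend_if {α : Type} (p : Int → Prop) [DecidablePred p] (g : Int → List α)
    (l : List Int) (acc : List α) :
    l.foldl (fun acc x => if p x then acc ++ g x else acc) acc
      = acc ++ l.flatMap (fun x => if p x then g x else []) := by
  have hstep : (fun (acc : List α) (x : Int) => if p x then acc ++ g x else acc)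
      = fun acc x => acc ++ (if p x then g x else []) := by
    funext acc x; split_ifs <;> simp
  rw [hstep, PySem.List.foldl_append_eq_flatMap]

-- ===== VERDICT (by name: the statement is the Claim_ definition above) =====
theorem conseguir_ventana_spec : Claim_equal_conseguir_ventana := by
  intro lista columna fila ventana nueva_lista contador _hdom hpre
  unfold Spec_conseguir_ventana conseguir_ventana conseguir_ventana_alt
  dsimp only
  rcases hpre with heq | ⟨hlt, hrest⟩
  · subst heq
    simp [conseguir_ventana_go, PySem.List.pyRange_one]
  · have hfuel : ((ventana - contador).toNat : Int) = ventana - contador := by omega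
    rw [conseguir_go_eq lista columna fila ventana (ventana - contador).toNat nueva_lista contador (by omega)]
    simp only [PySem.List.foldl_append_ite]
    rw [foldl_extend_if (fun c => 0 ≤ fila - ventana + c + 1 ∧ fila - ventana + c + 1 < (lista.length : Int))]
    simp only [List.nil_append]
    congr 1
    apply List.flatMap_congr
    intro cc hcc
    split_ifs with h
    · -- inner loop: A's conse_elemento equals the filtered-and-mapped inner range
      rcases hrest with hv | hall
      · rw [show conse_elemento (PySem.List.pyGetD lista (fila - ventana + cc + 1) []) columna ventana 0
              = conse_elemento_go (ventana.toNat + 1) (PySem.List.pyGetD lista (fila - ventana + cc + 1) []) columna ventana 0 by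
            unfold conse_elemento; congr 1; omega]
        exact conse_go_eq (PySem.List.pyGetD lista (fila - ventana + cc + 1) []) columna ventana ventana.toNat 0 (by omega)
      · exact absurd h (hall cc hcc)
    · rfl
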